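-- pv_equiv track=rewrite | github.com/achuthanandGit/Kings-Restaurant | kingsrestaurant/kingsres/kings_service/view_service.py | arrange_food_menu
-- ===== SOURCE A (Python) =====
-- def arrange_food_menu(food_menu_list):
--     # variable to save final changes
--     resulatant_dic= {}
--     # index variable is used to track the positions of category data in food_menu_list
--     index = 0
--     dic_length = len(food_menu_list)
--     range_length = 0
--
--     # to determine how many rows are required
--     if dic_length % 2 == 0:
--         range_length = dic_length/2
--     else:
--         range_length = int(dic_length/2) + 1
--     dic_key_list = list(food_menu_list)
--
--     # creating rows with 2 columns. Each column will have one category food items with category as title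
--     for i in range(int(range_length)):
--         dict1 = {}
--         dict2 = {}
--         dict1.update( {dic_key_list[index] : food_menu_list[dic_key_list[index]]} )
--         index+=1
--         if(index < len(food_menu_list)):
--             dict2.update( {dic_key_list[index] : food_menu_list[dic_key_list[index]]} )
--             index+=1
--             resulatant_dic.update(
--                 {
--                     "row"+str(i) :[dict1, dict2]
--                 }
--             )
--         else:
--             resulatant_dic.update(
--                 {
--                     "row"+str(i) :[dict1]
--                 }
--             )
--     return resulatant_dic
-- ===== SOURCE B (Python) =====
-- def arrange_food_menu(food_menu_list):
--     items = list(food_menu_list.items())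
--     result = {}
--     for i in range(0, len(items), 2):
--         result["row" + str(i // 2)] = [{k: v} for k, v in items[i:i + 2]]
--     return result
-- ===== Notes on version B (the rewrite author's own statement) =====
-- stated objective: simpler
-- what changed: B drops A's row-count/parity computation, the running index and the explicit odd/even if-else: it walks the items with one stride-2 loop and lets the slice items[i:i+2] produce each (possibly short) row directly, pairing keys with their values instead of re-looking every key up in the dict.
import Mathlib
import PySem

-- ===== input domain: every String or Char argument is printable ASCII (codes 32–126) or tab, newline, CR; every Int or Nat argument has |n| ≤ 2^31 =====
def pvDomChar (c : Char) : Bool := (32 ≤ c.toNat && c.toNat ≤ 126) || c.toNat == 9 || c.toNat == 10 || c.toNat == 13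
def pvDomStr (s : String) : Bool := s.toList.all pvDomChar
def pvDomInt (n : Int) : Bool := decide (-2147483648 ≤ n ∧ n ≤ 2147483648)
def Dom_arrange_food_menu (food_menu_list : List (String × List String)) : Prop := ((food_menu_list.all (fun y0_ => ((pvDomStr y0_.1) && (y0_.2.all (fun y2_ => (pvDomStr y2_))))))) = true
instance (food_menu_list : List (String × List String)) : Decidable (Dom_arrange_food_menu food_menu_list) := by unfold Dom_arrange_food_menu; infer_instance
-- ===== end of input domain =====

-- B replaces A's parity/row-count bookkeeping and explicit odd/even branch by one stride-2 loop
-- whose slice items[i:i+2] yields the (possibly short) row directly: objective = simpler.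


-- ===== PORT A =====
-- A's for-loop over range(range_length), as structural recursion on the remaining step count;
-- i (the row number) and index (the position in the key list) are the loop's Python variables.
-- Python raises IndexError where pyGet? is none; the loop body keeps index < len(keys), so the
-- none branches are unreachable (the else-value [] is never returned).
def afmLoop (m : List (String × List String)) (keys : List String)
    (steps : Nat) (i : Int) (index : Int)
    (res : PySem.Dict String (List (List (String × List String)))) :
    PySem.Dict String (List (List (String × List String))) :=
  match steps with
  | 0 => res
  | s + 1 =>
    let dict1 : List (String × List String) :=
      match PySem.List.pyGet? keys index with
      | some k => [(k, ((PySem.Dict.mk m).get? k).getD [])]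
      | none => []
    let index1 := index + 1
    if index1 < (m.length : Int) then
      let dict2 : List (String × List String) :=
        match PySem.List.pyGet? keys index1 with
        | some k => [(k, ((PySem.Dict.mk m).get? k).getD [])]
        | none => []
      afmLoop m keys s (i + 1) (index1 + 1)
        (res.insert ("row" ++ PySem.Int.toStr i) [dict1, dict2])
    else
      afmLoop m keys s (i + 1) index1
        (res.insert ("row" ++ PySem.Int.toStr i) [dict1])

def arrange_food_menu (food_menu_list : List (String × List String)) : List (String × List (List (String × List String))) :=
  let dic_length : Int := food_menu_list.length
  -- Python: dic_length/2 is float true division; int() of it equals dic_length // 2 here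
  -- (0 ≤ dic_length ≤ 2^31, exactly representable), so range(int(range_length)) is range of:
  let range_length : Int :=
    if PySem.Int.mod dic_length 2 = 0 then PySem.Int.floordiv dic_length 2
    else PySem.Int.floordiv dic_length 2 + 1
  let dic_key_list := food_menu_list.map Prod.fst
  (afmLoop food_menu_list dic_key_list range_length.toNat 0 0 PySem.Dict.empty).items

-- ===== PORT B =====
-- Source B's 'for i in range(0, len(items), 2)' as the obvious recursion on i with guard i < len.
def afmAltLoop (items : List (String × List String)) (i : Int)
    (res : PySem.Dict String (List (List (String × List String)))) :
    PySem.Dict String (List (List (String × List String))) :=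
  if h : i < (items.length : Int) then
    afmAltLoop items (i + 2)
      (res.insert ("row" ++ PySem.Int.toStr (PySem.Int.floordiv i 2))
        ((PySem.List.slice items (some i) (some (i + 2))).map (fun kv => [(kv.1, kv.2)])))
  else res
  termination_by ((items.length : Int) - i).toNat
  decreasing_by omega

def arrange_food_menu_alt (food_menu_list : List (String × List String)) : List (String × List (List (String × List String))) :=
  (afmAltLoop food_menu_list 0 PySem.Dict.empty).items

-- ===== PRECONDITION & SPEC =====
-- Pre_ excludes association lists with duplicate keys: a Python dict cannot hold them, so no
-- Python input reaches A there; on such lists A's lookup-by-key and B's direct pairing differ.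
def Pre_arrange_food_menu (food_menu_list : List (String × List String)) : Prop :=
  (food_menu_list.map Prod.fst).Nodup
instance (food_menu_list : List (String × List String)) : Decidable (Pre_arrange_food_menu food_menu_list) := by unfold Pre_arrange_food_menu; infer_instance
def pvWitness_arrange_food_menu : (List (String × List String)) :=
  [("starters", ["soup", "salad"]), ("mains", ["curry"]), ("desserts", [])]

def Spec_arrange_food_menu (food_menu_list : List (String × List String)) (out : List (String × List (List (String × List String)))) : Prop := out = arrange_food_menu_alt food_menu_list
instance (food_menu_list : List (String × List String)) (out : List (String × List (List (String × List String)))) : Decidable (Spec_arrange_food_menu food_menu_list out) := by unfold Spec_arrange_food_menu; infer_instance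

-- ===== CLAIM (what is proved, stated in full; the proofs are below) =====
def Claim_equal_arrange_food_menu : Prop := ∀ (food_menu_list : List (String × List String)), Dom_arrange_food_menu food_menu_list → Pre_arrange_food_menu food_menu_list → Spec_arrange_food_menu food_menu_list (arrange_food_menu food_menu_list)

-- ===== LEMMAS AND PROOFS =====

-- With distinct keys, looking the j-th key back up in the dict returns the j-th value.
theorem get?_mk_key (m : List (String × List String)) (hnd : (m.map Prod.fst).Nodup)
    (j : Nat) (hj : j < m.length) :
    (PySem.Dict.mk m).get? m[j].1 = some m[j].2 := by
  induction m generalizing j with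
  | nil => simp at hj
  | cons p rest ih =>
    cases j with
    | zero => rw [PySem.Dict.get?_mk_cons]; simp
    | succ j' =>
      simp only [List.map_cons, List.nodup_cons] at hnd
      have hj' : j' < rest.length := by simpa using hj
      have hmem : rest[j'].1 ∈ rest.map Prod.fst := List.mem_map_of_mem (List.getElem_mem hj')
      rw [PySem.Dict.get?_mk_cons]
      have hne : (p.1 == (p :: rest)[j' + 1].1) = false := by
        simp only [List.getElem_cons_succ]
        exact beq_false_of_ne (fun h => hnd.1 (h ▸ hmem))
      rw [hne]
      simpa using ih hnd.2 j' hj' 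

theorem loop_eq (m : List (String × List String)) (hnd : (m.map Prod.fst).Nodup)
    (s iA : Nat) (hs : s + iA = (m.length + 1) / 2)
    (res : PySem.Dict String (List (List (String × List String)))) :
    afmLoop m (m.map Prod.fst) s (iA : Int) ((2 * iA : Nat) : Int) res
      = afmAltLoop m ((2 * iA : Nat) : Int) res := by
  induction s generalizing iA res with
  | zero =>
    rw [afmLoop, afmAltLoop, dif_neg]
    omega
  | succ s' ih =>
    have hlt : 2 * iA < m.length := by omega
    have hkeys : (m.map Prod.fst).length = m.length := by simp
    rw [afmLoop]
    rw [PySem.List.pyGet?_natCast]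
    rw [List.getElem?_eq_getElem (by simpa using hlt)]
    simp only [List.getElem_map]
    rw [get?_mk_key m hnd (2 * iA) hlt]
    rw [afmAltLoop, dif_pos (by exact_mod_cast hlt)]
    have hslice : PySem.List.slice m (some ((2 * iA : Nat) : Int)) (some (((2 * iA : Nat) : Int) + 2))
        = (m.drop (2 * iA)).take 2 := by
      have := PySem.List.slice_natCast_add (xs := m) (j := 2 * iA) (n := 2)
      simpa using this
    have hdiv : PySem.Int.floordiv ((2 * iA : Nat) : Int) 2 = (iA : Int) := by
      rw [PySem.Int.floordiv_eq_ediv_of_pos (by omega)]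
      omega
    by_cases h2 : 2 * iA + 1 < m.length
    · -- full row of two columns
      rw [if_pos (by push_cast; omega)]
      rw [show ((2 * iA : Nat) : Int) + 1 = ((2 * iA + 1 : Nat) : Int) by push_cast; ring]
      rw [PySem.List.pyGet?_natCast, List.getElem?_eq_getElem (by simpa using h2)]
      simp only [List.getElem_map]
      rw [get?_mk_key m hnd (2 * iA + 1) h2]
      have hdrop : (m.drop (2 * iA)).take 2 = [m[2 * iA], m[2 * iA + 1]] := by
        have h' : m.drop (2 * iA + 1) = m[2 * iA + 1] :: m.drop (2 * iA + 1 + 1) :=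
          List.drop_eq_getElem_cons h2
        rw [List.drop_eq_getElem_cons hlt, h']; rfl
      rw [hslice, hdrop, hdiv]
      simp only [List.map_cons, List.map_nil, Option.getD_some]
      rw [show ((2 * iA + 1 : Nat) : Int) + 1 = ((2 * (iA + 1) : Nat) : Int) by push_cast; ring,
          show ((2 * iA : Nat) : Int) + 2 = ((2 * (iA + 1) : Nat) : Int) by push_cast; ring,
          show (iA : Int) + 1 = ((iA + 1 : Nat) : Int) by push_cast; ring]
      exact ih (iA + 1) (by omega) _
    · -- odd tail: one-column last row; the remaining step count is zero
      have hn : m.length = 2 * iA + 1 := by omega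
      have hs0 : s' = 0 := by omega
      rw [if_neg (by push_cast; omega)]
      have hdrop : (m.drop (2 * iA)).take 2 = [m[2 * iA]] := by
        have : m.drop (2 * iA) = [m[2 * iA]] := by
          rw [List.drop_eq_getElem_cons hlt]
          simp [List.drop_eq_nil_of_le, hn]
        rw [this]; rfl
      rw [hslice, hdrop, hdiv, hs0, afmLoop, afmAltLoop, dif_neg (by push_cast; omega)]
      simp

-- ===== VERDICT (by name: the statement is the Claim_ definition above) =====
theorem arrange_food_menu_spec : Claim_equal_arrange_food_menu := by
  intro m _ hnd
  unfold Spec_arrange_food_menu arrange_food_menu arrange_food_menu_alt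
  have hrl : (if PySem.Int.mod (m.length : Int) 2 = 0
      then PySem.Int.floordiv (m.length : Int) 2
      else PySem.Int.floordiv (m.length : Int) 2 + 1).toNat = (m.length + 1) / 2 := by
    rw [PySem.Int.mod_eq_emod_of_pos (by omega), PySem.Int.floordiv_eq_ediv_of_pos (by omega)]
    split_ifs with h <;> omega
  simp only [hrl]
  have h := loop_eq m hnd ((m.length + 1) / 2) 0 (by omega) PySem.Dict.empty
  simp only [Nat.mul_zero, Nat.cast_zero] at h
  exact congrArg PySem.Dict.items h
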